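-- pv_equiv track=rewrite | github.com/kuznetsovvj/education | algorithms/codeforces/1831b.py | count
-- ===== SOURCE A (Python) =====
-- from collections import defaultdict
--
-- def count(a):
--     s = defaultdict(int)
--     cnt_v, cnt_c = a[0], 0
--     for idx, item in enumerate(a):
--         if item == cnt_v:
--             cnt_c += 1
--         else:
--             s[cnt_v] = max(s[cnt_v], cnt_c)
--             cnt_v = item
--             cnt_c = 1
--     s[cnt_v] = max(s[cnt_v], cnt_c)
--     return s
-- ===== SOURCE B (Python) =====
-- def count(a):
--     # Stage 1 (DP table): r[i] = length of the run of equal values ending at index i.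
--     r = [1]
--     for x, y in zip(a, a[1:]):
--         r.append(r[-1] + 1 if x == y else 1)
--     # Stage 2: threshold fold — record r[i] under a[i] whenever it beats the stored best.
--     d = {}
--     for x, k in zip(a, r):
--         if k > d.get(x, 0):
--             d[x] = k
--     return d
-- ===== Notes on version B (the rewrite author's own statement) =====
-- stated objective: alternative
-- what changed: B replaces A's single-pass run-flushing state machine (cnt_v/cnt_c with flush-on-change plus a trailing flush) by a two-stage dynamic program: first a table of run lengths ending at each index, then a threshold fold that records a value's run length in the dict whenever it beats the stored best.
-- crash fix: On the empty list A raises IndexError (it indexes the first element to seed cnt_v); B naturally returns the empty dict. — e.g. on count([]): A raises IndexError, B returns []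
import Mathlib
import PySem

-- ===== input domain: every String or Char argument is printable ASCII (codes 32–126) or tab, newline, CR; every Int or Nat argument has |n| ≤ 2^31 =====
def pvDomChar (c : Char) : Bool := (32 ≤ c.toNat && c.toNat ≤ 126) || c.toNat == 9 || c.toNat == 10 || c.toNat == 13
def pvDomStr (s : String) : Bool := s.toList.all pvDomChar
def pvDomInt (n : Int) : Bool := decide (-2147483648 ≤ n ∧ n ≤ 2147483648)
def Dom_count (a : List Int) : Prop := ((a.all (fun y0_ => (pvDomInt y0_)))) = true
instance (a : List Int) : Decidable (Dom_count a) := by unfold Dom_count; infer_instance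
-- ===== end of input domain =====

-- B replaces A's single-pass run-flushing state machine by a two-stage DP: a table of
-- run lengths ending at each index, then a threshold fold into the dict (alternative, same cost).
-- ===== PORT A =====
-- A's loop: state (s, cnt_v, cnt_c); bump the run counter or flush the finished run; final flush.
def countStep (st : PySem.Dict Int Int × Int × Int) (item : Int) : PySem.Dict Int Int × Int × Int :=
  if item == st.2.1 then (st.1, st.2.1, st.2.2 + 1)
  else (st.1.insert st.2.1 (max (st.1.getD st.2.1 0) st.2.2), item, 1)

def count (a : List Int) : List (Int × Int) :=
  match a with
  | [] => []   -- Python raises IndexError reading a[0]; excluded by Pre_count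
  | h :: _ =>
    let st := a.foldl countStep (PySem.Dict.empty, h, 0)
    (st.1.insert st.2.1 (max (st.1.getD st.2.1 0) st.2.2)).items

-- ===== PORT B =====
-- Stage 1: r.append(r[-1] + 1 if x == y else 1); r is nonempty throughout, so r[-1] = getLastD r 0 exactly.
def rstep (r : List Int) (p : Int × Int) : List Int :=
  r ++ [if p.1 == p.2 then r.getLastD 0 + 1 else 1]

-- Stage 2: if k > d.get(x, 0): d[x] = k
def dstep (d : PySem.Dict Int Int) (p : Int × Int) : PySem.Dict Int Int :=
  if p.2 > d.getD p.1 0 then d.insert p.1 p.2 else d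

def count_alt (a : List Int) : List (Int × Int) :=
  let r := (a.zip (a.drop 1)).foldl rstep [1]   -- zip(a, a[1:]): a[1:] on a list is exactly drop 1
  ((a.zip r).foldl dstep PySem.Dict.empty).items

-- ===== PRECONDITION & SPEC =====
-- Pre_ excludes only the empty list, on which Python A raises IndexError reading a[0].
def Pre_count (a : List Int) : Prop := a ≠ []
instance (a : List Int) : Decidable (Pre_count a) := by unfold Pre_count; infer_instance
def pvWitness_count : List Int := [1, 1, 2, 1]

-- On the empty list A raises IndexError (it indexes the first element); B naturally returns the empty dict.
def Raises_count (a : List Int) : Prop := a = []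
instance (a : List Int) : Decidable (Raises_count a) := by unfold Raises_count; infer_instance
def pvRaiseWitness_count : List Int := []
def pvRaiseWitnessOut_count : List (Int × Int) := []

def Spec_count (a : List Int) (out : List (Int × Int)) : Prop := out = count_alt a
instance (a : List Int) (out : List (Int × Int)) : Decidable (Spec_count a out) := by unfold Spec_count; infer_instance

-- ===== CLAIM (what is proved, stated in full; the proofs are below) =====
def Claim_equal_count : Prop := ∀ (a : List Int), Dom_count a → Pre_count a → Spec_count a (count a)
def Claim_raises_count : Prop := (∀ (a : List Int), Dom_count a → Raises_count a → ¬ Pre_count a) ∧ (Dom_count (pvRaiseWitness_count) ∧ Raises_count (pvRaiseWitness_count) ∧ count_alt (pvRaiseWitness_count) = pvRaiseWitnessOut_count)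

-- ===== LEMMAS AND PROOFS =====

-- run lengths ending at successive positions of t, with v the previous value and n its run length
def rl (v n : Int) : List Int → List Int
  | [] => []
  | x :: xs => let k := if x == v then n + 1 else 1; k :: rl x k xs

-- Stage 1 computes rl: folding rstep over zip(prev::t, t) appends rl prev n t.
theorem foldl_rstep_eq_rl (t : List Int) (prev n : Int) (racc : List Int)
    (h : racc.getLastD 0 = n) :
    ((prev :: t).zip t).foldl rstep racc = racc ++ rl prev n t := by
  induction t generalizing prev n racc with
  | nil => simp [rl]
  | cons x xs ih =>
    have hk : rstep racc (prev, x) = racc ++ [if x == prev then n + 1 else 1] := by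
      simp only [rstep]
      rw [h]
      by_cases hpx : x = prev
      · simp [hpx]
      · simp [hpx, Ne.symm hpx]
    rw [List.zip_cons_cons, List.foldl_cons, hk,
        ih x (if x == prev then n + 1 else 1) _ (by simp)]
    simp [rl, List.append_assoc]

-- "flush": what A writes for a finished (or final) run
def flush (d : PySem.Dict Int Int) (v n : Int) : PySem.Dict Int Int :=
  d.insert v (max (d.getD v 0) n)

-- a re-insert of the value already stored is the identity
theorem insert_getD_self (d : PySem.Dict Int Int) (k m : Int)
    (hnd : d.keys.Nodup) (hc : d.contains k = true) (h : d.getD k 0 = m) :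
    d.insert k m = d := by
  apply PySem.Dict.ext
  rw [PySem.Dict.items_insert]
  simp only [hc, if_true]
  have hcongr : ∀ p ∈ d.items, (if p.1 == k then (k, m) else p) = p := by
    intro ⟨pk, pv⟩ hp
    by_cases hpk : pk = k
    · have hv : d.getD pk 0 = pv := PySem.Dict.getD_of_mem_items (d := d) hp hnd 0
      have : pv = m := by rw [← h, ← hpk, hv]
      simp [hpk, ← this]
    · simp [hpk]
  calc List.map (fun p => if p.1 == k then (k, m) else p) d.items
      = List.map id d.items := List.map_congr_left hcongr
    _ = d.items := List.map_id d.items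

-- one dstep on a flushed dict is the flush of the bumped run (x == v case)
theorem dstep_flush_same (d : PySem.Dict Int Int) (v n : Int) :
    dstep (flush d v n) (v, n + 1) = flush d v (n + 1) := by
  unfold dstep flush
  rw [PySem.Dict.getD_insert_self]
  by_cases h : n + 1 > max (d.getD v 0) n
  · have hm : max (d.getD v 0) (n + 1) = n + 1 := by omega
    rw [if_pos h, hm, PySem.Dict.insert_insert_self]
  · have hm : max (d.getD v 0) n = max (d.getD v 0) (n + 1) := by omega
    rw [if_neg h, hm]

-- one dstep on a flushed dict is a fresh flush (x ≠ v case: new run of length 1)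
theorem dstep_flush_one (d : PySem.Dict Int Int) (x : Int) (hnd : d.keys.Nodup) :
    dstep d (x, 1) = flush d x 1 := by
  unfold dstep flush
  by_cases h : 1 > d.getD x 0
  · have : max (d.getD x 0) 1 = 1 := by omega
    simp [h, this]
  · have hm : max (d.getD x 0) 1 = d.getD x 0 := by omega
    have hc : d.contains x = true := by
      by_contra hc
      have := PySem.Dict.getD_of_not_contains (d := d) (k := x) (d0 := (0 : Int))
        (by simpa using hc)
      omega
    simp only [h, if_false, hm]
    exact (insert_getD_self d x _ hnd hc rfl).symm

theorem nodup_flush (d : PySem.Dict Int Int) (v n : Int) (hnd : d.keys.Nodup) :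
    (flush d v n).keys.Nodup := PySem.Dict.nodup_keys_insert _ _ _ hnd

-- main invariant: B's stage-2 fold over the remaining run lengths, started from the
-- flush of A's current run, equals A's final flush after folding countStep.
theorem stage2_eq_loopA (t : List Int) (d : PySem.Dict Int Int) (v n : Int)
    (hnd : d.keys.Nodup) :
    (t.zip (rl v n t)).foldl dstep (flush d v n)
      = flush (t.foldl countStep (d, v, n)).1 (t.foldl countStep (d, v, n)).2.1
          (t.foldl countStep (d, v, n)).2.2 := by
  induction t generalizing d v n with
  | nil => simp
  | cons x xs ih =>
    by_cases h : x = v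
    · subst h
      have e1 : rl x n (x :: xs) = (n + 1) :: rl x (n + 1) xs := by simp [rl]
      have e2 : countStep (d, x, n) x = (d, x, n + 1) := by simp [countStep]
      rw [e1, List.zip_cons_cons, List.foldl_cons, dstep_flush_same d x n,
          List.foldl_cons, e2]
      exact ih d x (n + 1) hnd
    · have e1 : rl v n (x :: xs) = 1 :: rl x 1 xs := by simp [rl, h]
      have e2 : countStep (d, v, n) x = (flush d v n, x, 1) := by
        simp [countStep, flush, h]
      rw [e1, List.zip_cons_cons, List.foldl_cons,
          dstep_flush_one (flush d v n) x (nodup_flush d v n hnd),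
          List.foldl_cons, e2]
      exact ih (flush d v n) x 1 (nodup_flush d v n hnd)

-- ===== VERDICT (by name: the statement is the Claim_ definition above) =====
theorem count_spec : Claim_equal_count := by
  intro a _ hpre
  unfold Spec_count
  match a with
  | [] => exact absurd rfl hpre
  | h :: t =>
    have hr : ((h :: t).zip ((h :: t).drop 1)).foldl rstep [1] = [1] ++ rl h 1 t := by
      simpa using foldl_rstep_eq_rl t h 1 [1] rfl
    have hd0 : dstep PySem.Dict.empty (h, 1) = flush PySem.Dict.empty h 1 := by
      simp [dstep, flush, PySem.Dict.getD_empty]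
    have hmain := stage2_eq_loopA t PySem.Dict.empty h 1 PySem.Dict.nodup_keys_empty
    have hstep0 : countStep (PySem.Dict.empty, h, 0) h = (PySem.Dict.empty, h, 1) := by
      simp [countStep]
    simp only [count, count_alt, hr, List.singleton_append, List.zip_cons_cons,
      List.foldl_cons, hstep0]
    rw [hd0, hmain]
    simp [flush]

@[simp] theorem count_raises : Claim_raises_count := by
  unfold Claim_raises_count
  exact ⟨fun a _ h => by simp [Raises_count] at h; simp [Pre_count, h], by decide⟩
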